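-- pv_equiv track=rewrite | github.com/Mikeal02/Data-Structure | Python/Array/majority_ele_by3.py | majority_ele_by3
-- ===== SOURCE A (Python) =====
-- from collections import defaultdict
--
-- def majority_ele_by3(arr):
--     n=len(arr)
--     freq=defaultdict(int)
--     for i in range(n):
--         freq[arr[i]]+=1
--
--     for x,y in freq.items():
--         if y>n//3:
--             return x
-- ===== SOURCE B (Python) =====
-- def majority_ele_by3(arr):
--     n = len(arr)
--     for x in arr:
--         if arr.count(x) > n // 3:
--             return x
--     return None
-- ===== Notes on version B (the rewrite author's own statement) =====
-- stated objective: idiomatic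
-- what changed: Replaced the defaultdict frequency pass plus items scan by a single direct scan over arr that tests arr.count(x) > n//3 and returns the first qualifying element.
import Mathlib
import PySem

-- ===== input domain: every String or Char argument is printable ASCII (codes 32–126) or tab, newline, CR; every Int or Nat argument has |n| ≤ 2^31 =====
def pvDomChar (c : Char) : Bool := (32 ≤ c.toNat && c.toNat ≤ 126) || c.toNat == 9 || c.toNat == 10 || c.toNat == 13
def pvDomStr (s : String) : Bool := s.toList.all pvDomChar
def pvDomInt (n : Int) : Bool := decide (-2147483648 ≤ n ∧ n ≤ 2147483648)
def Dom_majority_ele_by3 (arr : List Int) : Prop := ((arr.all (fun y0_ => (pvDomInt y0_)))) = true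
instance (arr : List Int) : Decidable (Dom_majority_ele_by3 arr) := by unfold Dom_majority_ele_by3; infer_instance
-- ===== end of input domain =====

-- B replaces A's frequency-dict pass + items scan by a direct scan of arr testing arr.count(x) > n//3 (idiomatic, no dict).

-- ===== PORT A =====
-- 'for x,y in freq.items(): if y > n//3: return x'
def pvLoopA (t : Int) : List (Int × Int) → Option Int
  | [] => none
  | (x, y) :: rest => if y > t then some x else pvLoopA t rest

def majority_ele_by3 (arr : List Int) : Option Int :=
  -- n = len(arr); 'for i in range(n): freq[arr[i]] += 1' (arr[i] is in range, so pyGetD is exact here)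
  pvLoopA (PySem.Int.floordiv (arr.length : Int) 3)
    ((PySem.List.pyRange 0 (arr.length : Int) 1).foldl
      (fun d i => d.modify (PySem.List.pyGetD arr i 0) 0 (· + 1)) PySem.Dict.empty).items

-- ===== PORT B =====
-- 'for x in arr: if arr.count(x) > n//3: return x'
def pvLoopB (full : List Int) (t : Int) : List Int → Option Int
  | [] => none
  | x :: rest => if (PySem.List.count full x : Int) > t then some x else pvLoopB full t rest

def majority_ele_by3_alt (arr : List Int) : Option Int :=
  pvLoopB arr (PySem.Int.floordiv (arr.length : Int) 3) arr

-- ===== PRECONDITION & SPEC =====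
def Spec_majority_ele_by3 (arr : List Int) (out : Option Int) : Prop := out = majority_ele_by3_alt arr
instance (arr : List Int) (out : Option Int) : Decidable (Spec_majority_ele_by3 arr out) := by unfold Spec_majority_ele_by3; infer_instance

-- ===== CLAIM (what is proved, stated in full; the proofs are below) =====
def Claim_equal_majority_ele_by3 : Prop := ∀ (arr : List Int), Dom_majority_ele_by3 arr → Spec_majority_ele_by3 arr (majority_ele_by3 arr)

-- ===== LEMMAS AND PROOFS =====

-- folding Set.add only appends new elements
theorem pv_foldl_add_suffix {α : Type} [BEq α] (l : List α) (s : List α) :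
    ∃ r, l.foldl PySem.Set.add s = s ++ r := by
  induction l generalizing s with
  | nil => exact ⟨[], by simp⟩
  | cons a l ih =>
    obtain ⟨r, hr⟩ := ih (PySem.Set.add s a)
    simp only [List.foldl_cons, hr]
    unfold PySem.Set.add
    split
    · exact ⟨r, rfl⟩
    · exact ⟨[a] ++ r, by simp⟩

-- find? over set(l) built on top of failing seed = find? over l
theorem pv_find_foldl_add {α : Type} [BEq α] [LawfulBEq α] (l : List α) (p : α → Bool) :
    ∀ s : List α, (∀ x ∈ s, p x = false) →
      List.find? p (l.foldl PySem.Set.add s) = List.find? p l := by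
  induction l with
  | nil => intro s hs; simpa using List.find?_eq_none.mpr (fun x hx => by simp [hs x hx])
  | cons a l ih =>
    intro s hs
    simp only [List.foldl_cons]
    by_cases hp : p a = true
    · have hmem : a ∉ s := fun h => by simp [hs a h] at hp
      have hadd : PySem.Set.add s a = s ++ [a] := by
        unfold PySem.Set.add
        simp [PySem.Set.contains, hmem]
      obtain ⟨r, hr⟩ := pv_foldl_add_suffix l (PySem.Set.add s a)
      rw [hr, hadd, List.find?_append, List.find?_append,
        List.find?_eq_none.mpr (fun x hx => by simp [hs x hx])]
      simp [hp]
    · have hs' : ∀ x ∈ PySem.Set.add s a, p x = false := by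
        intro x hx
        unfold PySem.Set.add at hx
        split at hx
        · exact hs x hx
        · rcases List.mem_append.mp hx with h | h
          · exact hs x h
          · simp only [List.mem_singleton] at h
            subst h; simpa using hp
      rw [ih _ hs', List.find?_cons]
      simp [hp]

theorem pv_find_ofList {α : Type} [BEq α] [LawfulBEq α] (l : List α) (p : α → Bool) :
    List.find? p (PySem.Set.ofList l) = List.find? p l := by
  rw [PySem.Set.ofList_eq_foldl]
  exact pv_find_foldl_add l p [] (by intro x hx; simp at hx)

-- A's items loop over (k, c k) pairs is a find? on the keys
theorem pv_loopA_map (t : Int) (c : Int → Int) (d : List Int) :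
    pvLoopA t (d.map (fun k => (k, c k))) = d.find? (fun k => decide (c k > t)) := by
  induction d with
  | nil => rfl
  | cons a d ih =>
    simp only [List.map_cons, pvLoopA, ih, List.find?_cons]
    by_cases h : c a > t
    · simp [h]
    · simp [h]

-- B's loop is a find?
theorem pv_loopB_find (full : List Int) (t : Int) (l : List Int) :
    pvLoopB full t l = l.find? (fun x => decide ((PySem.List.count full x : Int) > t)) := by
  induction l with
  | nil => rfl
  | cons a l ih =>
    simp only [pvLoopB, ih, List.find?_cons, PySem.List.count_eq]
    by_cases h : t < (List.count a full : Int)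
    · simp [h]
    · simp [h]

-- ===== VERDICT (by name: the statement is the Claim_ definition above) =====
theorem majority_ele_by3_spec : Claim_equal_majority_ele_by3 := by
  intro arr _
  unfold Spec_majority_ele_by3 majority_ele_by3 majority_ele_by3_alt
  rw [PySem.List.foldl_pyRange_pyGetD' arr 0
      (fun d x => PySem.Dict.modify d x 0 (· + 1)) PySem.Dict.empty (a := 0) (by norm_num)]
  rw [← PySem.Dict.counter_eq_foldl, PySem.Dict.items_counter, pv_loopA_map,
    pv_find_ofList, pv_loopB_find]
  simp [PySem.List.count_eq]
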